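-- pv_equiv track=rewrite | github.com/tobiasosborne/fundingscape | scripts/sample_qa_matches.py | find_matching_patterns
-- ===== SOURCE A (Python) =====
-- def find_matching_patterns(title: str | None, abstract: str | None,
--                            patterns: list[str]) -> list[str]:
--     """Return the list of patterns that match the given grant text."""
--     if not title and not abstract:
--         return []
--     title = (title or "").lower()
--     abstract = (abstract or "").lower()
--     matches = []
--     for p in patterns:
--         # Convert SQL ILIKE pattern to a Python substring match
--         # %foo%bar% means "foo" then anything then "bar"
--         # Strip leading/trailing %, split on %, all parts must appear in order.
--         parts = [s for s in p.strip("%").lower().split("%") if s]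
--         if not parts:
--             continue
--         for text in (title, abstract):
--             pos = 0
--             ok = True
--             for part in parts:
--                 idx = text.find(part, pos)
--                 if idx < 0:
--                     ok = False
--                     break
--                 pos = idx + len(part)
--             if ok:
--                 matches.append(p)
--                 break
--     return matches
-- ===== SOURCE B (Python) =====
-- import re
--
--
-- def find_matching_patterns(title, abstract, patterns):
--     """Return the list of patterns that match the given grant text."""
--     if not title and not abstract:
--         return []
--     texts = ((title or "").lower(), (abstract or "").lower())
--
--     def regex_for(p):
--         # %foo%bar% -> "foo" then anything then "bar": foo.*bar with DOTALL
--         parts = [s for s in p.strip("%").lower().split("%") if s]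
--         if not parts:
--             return None
--         return re.compile(".*".join(map(re.escape, parts)), re.DOTALL)
--
--     return [p for p in patterns
--             if (rx := regex_for(p)) is not None
--             and any(rx.search(t) for t in texts)]
-- ===== Notes on version B (the rewrite author's own statement) =====
-- stated objective: idiomatic
-- what changed: B compiles each ILIKE pattern once into a regex ('.*'-joined re.escape'd parts, re.DOTALL) and tests it with re.search over the two texts, replacing A's hand-rolled find/pos cursor loop with per-part bookkeeping and ok flags.
import Mathlib
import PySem

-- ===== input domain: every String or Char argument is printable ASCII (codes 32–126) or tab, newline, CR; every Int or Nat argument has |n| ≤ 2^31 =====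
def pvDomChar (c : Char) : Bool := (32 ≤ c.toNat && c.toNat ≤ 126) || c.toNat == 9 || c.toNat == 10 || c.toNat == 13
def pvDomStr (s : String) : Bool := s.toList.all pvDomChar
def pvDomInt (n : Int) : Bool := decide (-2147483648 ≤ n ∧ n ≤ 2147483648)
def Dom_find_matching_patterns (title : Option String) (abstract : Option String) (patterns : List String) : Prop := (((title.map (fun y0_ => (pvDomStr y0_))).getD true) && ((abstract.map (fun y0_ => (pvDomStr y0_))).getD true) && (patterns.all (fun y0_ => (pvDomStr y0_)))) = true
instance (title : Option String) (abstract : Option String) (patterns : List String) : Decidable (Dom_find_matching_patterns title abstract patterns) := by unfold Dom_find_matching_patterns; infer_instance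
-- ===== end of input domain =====

-- B re-implements the SQL-ILIKE matcher with a compiled regex ('.*'-joined escaped parts, DOTALL)
-- tested via re.search instead of A's hand-rolled find/pos scanning loop; return value only, no mutation.

-- ===== PORT A =====
-- A's inner 'for part in parts' loop: pos cursor, ok flag, break on a missing part
def pvAFind (text : List Char) : List (List Char) → Int → Bool
  | [], _ => true
  | part :: rest, pos =>
      let idx := PySem.Chars.findFrom text part pos none
      if idx < 0 then false
      else pvAFind text rest (idx + (part.length : Int))

-- A's loop body for one pattern p: parts, 'continue' when empty, 'for text in (title, abstract)' with break
def pvAStep (t a : List Char) (ms : List String) (p : String) : List String :=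
  let parts := (PySem.Chars.splitOn (PySem.Chars.lower (PySem.Chars.stripChars p.toList ['%'])) ['%']).filter (fun s => !s.isEmpty)
  if parts.isEmpty then ms
  else if pvAFind t parts 0 then ms ++ [p]      -- first text matched: append, break
  else if pvAFind a parts 0 then ms ++ [p]      -- second text (reached only after a failed first)
  else ms

def find_matching_patterns (title : Option String) (abstract : Option String) (patterns : List String) : List String :=
  if (title.getD "") == "" && (abstract.getD "") == "" then []
  else
    let t := PySem.Chars.lower (title.getD "").toList
    let a := PySem.Chars.lower (abstract.getD "").toList
    patterns.foldl (pvAStep t a) []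

-- ===== PORT B =====
-- Hand port of re.search(rx, t) for rx = '.*'.join(map(re.escape, parts)) under re.DOTALL —
-- exact for this regex shape: true iff the literal parts occur as substrings of t in order.
def pvReSearch : List (List Char) → List Char → Bool
  | [], _ => true
  | p :: ps, t =>
      (List.range (t.length + 1)).any fun j =>
        decide (p <+: t.drop j) && pvReSearch ps (t.drop (j + p.length))

-- B's regex_for: none = no parts (no regex), some = the compiled regex (kept as its part list)
def pvRegexFor (p : String) : Option (List (List Char)) :=
  let parts := (PySem.Chars.splitOn (PySem.Chars.lower (PySem.Chars.stripChars p.toList ['%'])) ['%']).filter (fun s => !s.isEmpty)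
  if parts.isEmpty then none else some parts

def find_matching_patterns_alt (title : Option String) (abstract : Option String) (patterns : List String) : List String :=
  if (title.getD "") == "" && (abstract.getD "") == "" then []
  else
    let texts := [PySem.Chars.lower (title.getD "").toList, PySem.Chars.lower (abstract.getD "").toList]
    patterns.filter fun p =>
      match pvRegexFor p with
      | none => false
      | some rx => texts.any fun t => pvReSearch rx t

-- ===== PRECONDITION & SPEC =====
def Spec_find_matching_patterns (title : Option String) (abstract : Option String) (patterns : List String) (out : List String) : Prop := out = find_matching_patterns_alt title abstract patterns
instance (title : Option String) (abstract : Option String) (patterns : List String) (out : List String) : Decidable (Spec_find_matching_patterns title abstract patterns out) := by unfold Spec_find_matching_patterns; infer_instance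

-- ===== CLAIM (what is proved, stated in full; the proofs are below) =====
def Claim_equal_find_matching_patterns : Prop := ∀ (title : Option String) (abstract : Option String) (patterns : List String), Dom_find_matching_patterns title abstract patterns → Spec_find_matching_patterns title abstract patterns (find_matching_patterns title abstract patterns)

-- ===== LEMMAS AND PROOFS =====

-- a regex match found in a suffix is a match in the whole text
theorem pvReSearch_of_drop (ps : List (List Char)) (l : List Char) (d : Nat)
    (h : pvReSearch ps (l.drop d) = true) : pvReSearch ps l = true := by
  induction ps generalizing l d with
  | nil => simp [pvReSearch]
  | cons p ps ih =>
    simp only [pvReSearch, List.any_eq_true, List.mem_range, Bool.and_eq_true,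
      decide_eq_true_eq] at h ⊢
    obtain ⟨j, hj, hpre, hrec⟩ := h
    rw [List.drop_drop] at hpre hrec
    refine ⟨min (d + j) l.length, by omega, ?_, ?_⟩
    · have hdropeq : l.drop (min (d + j) l.length) = l.drop (d + j) := by
        by_cases hle : d + j ≤ l.length
        · rw [Nat.min_eq_left hle]
        · rw [Nat.min_eq_right (by omega)]
          rw [List.drop_eq_nil_of_le (Nat.le_refl _), List.drop_eq_nil_of_le (by omega)]
      rw [hdropeq]; exact hpre
    · have hdropeq : l.drop (min (d + j) l.length + p.length) = l.drop (d + (j + p.length)) := by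
        by_cases hle : d + j ≤ l.length
        · rw [Nat.min_eq_left hle]; congr 1; omega
        · rw [Nat.min_eq_right (by omega)]
          rw [List.drop_eq_nil_of_le (by omega), List.drop_eq_nil_of_le (by omega)]
      rw [hdropeq]; exact hrec

-- A's greedy find/pos loop from cursor k decides exactly 'the parts occur in order in t.drop k'
theorem pvAFind_eq (parts : List (List Char)) (t : List Char) (k : Nat) (hk : k ≤ t.length) :
    pvAFind t parts (k : Int) = pvReSearch parts (t.drop k) := by
  induction parts generalizing k with
  | nil => simp [pvAFind, pvReSearch]
  | cons p ps ih =>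
    simp only [pvAFind]
    rw [PySem.Chars.findFrom_natCast t p k hk]
    by_cases hfind : PySem.Chars.find (t.drop k) p = -1
    · rw [if_pos hfind, if_pos (by norm_num : (-1 : Int) < 0)]
      have hninf : ¬ p <:+: t.drop k := (PySem.Chars.find_eq_neg_one_iff _ _).mp hfind
      have hnoj : ∀ j, ¬ p <+: (t.drop k).drop j := by
        intro j hpre
        exact hninf ((PySem.Chars.isIn_iff_infix _ _).mp
          ((PySem.Chars.exists_prefix_drop_iff_isIn _ _).mp ⟨j, hpre⟩))
      apply Eq.symm
      rw [pvReSearch, List.any_eq_false]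
      intro j hj hcontra
      rw [Bool.and_eq_true, decide_eq_true_eq] at hcontra
      exact hnoj j hcontra.1
    · have h0 : (0 : Int) ≤ PySem.Chars.find (t.drop k) p := by
        have := PySem.Chars.neg_one_le_find (t.drop k) p
        omega
      rw [if_neg hfind]
      have hidx : ¬ ((k : Int) + PySem.Chars.find (t.drop k) p < 0) := by omega
      rw [if_neg hidx]
      obtain ⟨hpre, hmin⟩ := PySem.Chars.find_spec h0
      have hlen1 : PySem.Chars.find (t.drop k) p ≤ ((t.drop k).length : Int) :=
        PySem.Chars.find_le_length _ _
      have hplen : p.length ≤ ((t.drop k).drop (PySem.Chars.find (t.drop k) p).toNat).length :=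
        hpre.length_le
      have hlen' : k + (PySem.Chars.find (t.drop k) p).toNat + p.length ≤ t.length := by
        simp only [List.length_drop] at hplen hlen1
        omega
      have hcast : (k : Int) + PySem.Chars.find (t.drop k) p + (p.length : Int)
          = ((k + (PySem.Chars.find (t.drop k) p).toNat + p.length : Nat) : Int) := by
        push_cast; omega
      rw [hcast, ih _ hlen']
      have hdd : t.drop (k + (PySem.Chars.find (t.drop k) p).toNat + p.length)
          = (t.drop k).drop ((PySem.Chars.find (t.drop k) p).toNat + p.length) := by
        rw [List.drop_drop]; congr 1; omega
      rw [hdd]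
      have hilen : (PySem.Chars.find (t.drop k) p).toNat ≤ (t.drop k).length := by
        simp only [List.length_drop] at hlen1 ⊢; omega
      cases hres : pvReSearch ps ((t.drop k).drop ((PySem.Chars.find (t.drop k) p).toNat + p.length)) with
      | true =>
        apply Eq.symm
        rw [pvReSearch, List.any_eq_true]
        exact ⟨(PySem.Chars.find (t.drop k) p).toNat, by rw [List.mem_range]; omega,
          by rw [Bool.and_eq_true, decide_eq_true_eq]; exact ⟨hpre, hres⟩⟩
      | false =>
        apply Eq.symm
        rw [pvReSearch, List.any_eq_false]
        intro j hj hcontra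
        rw [Bool.and_eq_true, decide_eq_true_eq] at hcontra
        obtain ⟨hpj, hres2⟩ := hcontra
        have hij : (PySem.Chars.find (t.drop k) p).toNat ≤ j :=
          Nat.not_lt.mp fun hlt => hmin j hlt hpj
        have hres' : pvReSearch ps ((t.drop k).drop ((PySem.Chars.find (t.drop k) p).toNat + p.length)) = true := by
          apply pvReSearch_of_drop ps _ (j - (PySem.Chars.find (t.drop k) p).toNat)
          rw [List.drop_drop]
          have heq : (PySem.Chars.find (t.drop k) p).toNat + p.length
              + (j - (PySem.Chars.find (t.drop k) p).toNat) = j + p.length := by omega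
          rw [heq]; exact hres2
        rw [hres] at hres'
        exact absurd hres' (by simp)

-- one step of A's fold appends p exactly when B's filter predicate keeps p
theorem pvAStep_eq (t a : List Char) (ms : List String) (p : String) :
    pvAStep t a ms p = if (match pvRegexFor p with
        | none => false
        | some rx => [t, a].any fun tx => pvReSearch rx tx) then ms ++ [p] else ms := by
  have h0 : ∀ tx : List Char, ∀ parts : List (List Char),
      pvAFind tx parts 0 = pvReSearch parts tx := by
    intro tx parts
    simpa using pvAFind_eq parts tx 0 (Nat.zero_le _)
  simp only [pvAStep, pvRegexFor]
  by_cases hp : ((PySem.Chars.splitOn (PySem.Chars.lower (PySem.Chars.stripChars p.toList ['%'])) ['%']).filter (fun s => !s.isEmpty)).isEmpty = true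
  · simp only [hp, if_true, Bool.false_eq_true, if_false]
  · have hp' : ((PySem.Chars.splitOn (PySem.Chars.lower (PySem.Chars.stripChars p.toList ['%'])) ['%']).filter (fun s => !s.isEmpty)).isEmpty = false := by
      cases h : ((PySem.Chars.splitOn (PySem.Chars.lower (PySem.Chars.stripChars p.toList ['%'])) ['%']).filter (fun s => !s.isEmpty)).isEmpty
      · rfl
      · exact absurd h hp
    simp only [hp', Bool.false_eq_true, if_false, h0, List.any_cons, List.any_nil, Bool.or_false]
    cases hre1 : pvReSearch ((PySem.Chars.splitOn (PySem.Chars.lower (PySem.Chars.stripChars p.toList ['%'])) ['%']).filter (fun s => !s.isEmpty)) t <;>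
      cases hre2 : pvReSearch ((PySem.Chars.splitOn (PySem.Chars.lower (PySem.Chars.stripChars p.toList ['%'])) ['%']).filter (fun s => !s.isEmpty)) a <;>
      simp

-- the pattern fold of A builds exactly B's filter
theorem pvFold_eq (t a : List Char) (pats : List String) (acc : List String) :
    pats.foldl (pvAStep t a) acc
    = acc ++ pats.filter (fun p =>
        match pvRegexFor p with
        | none => false
        | some rx => [t, a].any fun tx => pvReSearch rx tx) := by
  have hbody : pvAStep t a = fun ms p => if (match pvRegexFor p with
      | none => false
      | some rx => [t, a].any fun tx => pvReSearch rx tx) then ms ++ [p] else ms := by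
    funext ms p
    exact pvAStep_eq t a ms p
  rw [hbody, PySem.List.foldl_append_if_eq_filter]

-- ===== VERDICT (by name: the statement is the Claim_ definition above) =====
theorem find_matching_patterns_spec : Claim_equal_find_matching_patterns := by
  intro title abstract patterns _
  unfold Spec_find_matching_patterns find_matching_patterns find_matching_patterns_alt
  by_cases hg : ((title.getD "") == "" && (abstract.getD "") == "") = true
  · simp [hg]
  · rw [if_neg hg, if_neg hg]
    exact pvFold_eq _ _ patterns []
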